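-- pv_equiv track=rewrite | github.com/boubascript/CS-12700-assignments | 02/cb.py | string_bits
-- ===== SOURCE A (Python) =====
-- def string_bits(str):
--   bits = ""
--   i = 0
--   for l in str:
--     if (i % 2 == 0):
--       bits += l
--     i +=1
--   return bits
-- ===== SOURCE B (Python) =====
-- def string_bits(str):
--   return str[::2]
-- ===== Notes on version B (the rewrite author's own statement) =====
-- stated objective: idiomatic
-- what changed: Replaces the explicit loop with its index counter, parity test and string accumulation by a single strided slice str[::2].
import Mathlib
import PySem

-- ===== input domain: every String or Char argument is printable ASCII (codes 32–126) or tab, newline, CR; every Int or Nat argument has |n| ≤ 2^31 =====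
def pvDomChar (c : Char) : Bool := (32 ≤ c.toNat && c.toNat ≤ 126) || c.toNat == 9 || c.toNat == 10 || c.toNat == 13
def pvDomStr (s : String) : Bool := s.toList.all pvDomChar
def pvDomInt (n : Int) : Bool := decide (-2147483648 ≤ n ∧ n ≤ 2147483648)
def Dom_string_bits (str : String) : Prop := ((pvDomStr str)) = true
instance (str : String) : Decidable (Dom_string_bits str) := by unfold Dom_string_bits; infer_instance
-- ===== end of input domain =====

-- B replaces A's index-counting accumulation loop by one strided slice str[::2] (idiomatic).

-- ===== PORT A =====
-- A: scan every character, keep a running index i, append the character when i is even.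
def string_bits (str : String) : String :=
  (str.toList.foldl
    (fun (st : List Char × Int) l =>
      (if PySem.Int.mod st.2 2 = 0 then st.1 ++ [l] else st.1, st.2 + 1))
    (([] : List Char), (0 : Int))).1 |> String.ofList

-- ===== PORT B =====
-- B: return str[::2]; the step is the literal 2 ≠ 0, so slice? is always `some` (the "" arm is unreachable).
def string_bits_alt (str : String) : String :=
  match PySem.Str.slice? str none none 2 with
  | some r => r
  | none => ""

-- ===== PRECONDITION & SPEC =====
def Spec_string_bits (str : String) (out : String) : Prop := out = string_bits_alt str
instance (str : String) (out : String) : Decidable (Spec_string_bits str out) := by unfold Spec_string_bits; infer_instance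

-- ===== CLAIM (what is proved, stated in full; the proofs are below) =====
def Claim_equal_string_bits : Prop := ∀ (str : String), Dom_string_bits str → Spec_string_bits str (string_bits str)

-- ===== LEMMAS AND PROOFS =====

-- the even-index sublist, by structural two-step recursion
def pvEvens {α : Type} : List α → List α
  | [] => []
  | [a] => [a]
  | a :: _ :: t => a :: pvEvens t

lemma pvEvens_cons {α : Type} (a : α) (t : List α) :
    pvEvens (a :: t) = a :: pvEvens t.tail := by
  cases t <;> simp [pvEvens]

lemma pvFilterMap_two {α : Type} (xs : List α) :
    List.filterMap (fun k => xs[2 * k]?) (List.range ((xs.length + 1) / 2)) = pvEvens xs := by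
  match xs with
  | [] => simp [pvEvens]
  | [a] => simp [pvEvens, List.range_succ]
  | a :: b :: t =>
      have h : ((a :: b :: t).length + 1) / 2 = (t.length + 1) / 2 + 1 := by simp; omega
      rw [h, List.range_succ_eq_map]
      simp only [List.filterMap_cons, List.filterMap_map, Function.comp, pvEvens]
      have h3 : (fun k => (a :: b :: t)[2 * (k + 1)]?) = (fun k => t[2 * k]?) := by
        funext k
        have : 2 * (k + 1) = (2 * k) + 1 + 1 := by omega
        simp [this]
      simp [h3, pvFilterMap_two t]

lemma pvSlice?_two {α : Type} (xs : List α) :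
    PySem.List.slice? xs none none 2 = some (pvEvens xs) := by
  have hc : ((((xs.length : Int)) - 0 + 2 - 1) / 2).toNat = (xs.length + 1) / 2 := by omega
  simp only [PySem.List.slice?, PySem.List.sliceIndices]
  norm_num [hc]
  rw [← pvFilterMap_two xs]
  by_cases hn : 0 < xs.length
  · simp [hn]
    have he : ∀ k : ℕ, (((0:Int) + 2 * (k:Int)).toNat) = 2 * k := by intro k; omega
    have hr : ((( (xs.length:Int)) + 2 - 1) / 2).toNat = (xs.length + 1) / 2 := by omega
    simp [hr]
    congr 1
  · simp at hn
    simp [hn]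

lemma pvLoopA (xs : List Char) (acc : List Char) (i : Int) :
    (xs.foldl
      (fun (st : List Char × Int) l =>
        (if PySem.Int.mod st.2 2 = 0 then st.1 ++ [l] else st.1, st.2 + 1))
      (acc, i)).1
    = acc ++ (if PySem.Int.mod i 2 = 0 then pvEvens xs else pvEvens xs.tail) := by
  induction xs generalizing acc i with
  | nil => simp [pvEvens]
  | cons a t ih =>
      have hm : PySem.Int.mod i 2 = i % 2 := by rw [PySem.Int.mod_eq_emod_of_pos]; omega
      have hm1 : PySem.Int.mod (i + 1) 2 = (i + 1) % 2 := by rw [PySem.Int.mod_eq_emod_of_pos]; omega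
      by_cases h : PySem.Int.mod i 2 = 0
      · have h1 : ¬ PySem.Int.mod (i + 1) 2 = 0 := by rw [hm1]; rw [hm] at h; omega
        simp only [List.foldl_cons, h, ih, h1]
        rw [pvEvens_cons]
        simp
      · have h1 : PySem.Int.mod (i + 1) 2 = 0 := by rw [hm1]; rw [hm] at h; omega
        simp only [List.foldl_cons, if_neg h, ih, h1]
        simp

lemma pvStringBits_eq (str : String) : string_bits str = String.ofList (pvEvens str.toList) := by
  unfold string_bits
  rw [pvLoopA]
  simp [PySem.Int.mod]

lemma pvStringBitsAlt_eq (str : String) : string_bits_alt str = String.ofList (pvEvens str.toList) := by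
  unfold string_bits_alt
  simp [PySem.Str.slice?, PySem.Chars.slice?_eq_listSlice?, pvSlice?_two]

-- ===== VERDICT (by name: the statement is the Claim_ definition above) =====
theorem string_bits_spec : Claim_equal_string_bits := by
  intro str _
  unfold Spec_string_bits
  rw [pvStringBits_eq, pvStringBitsAlt_eq]
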